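-- pv_equiv track=rewrite | github.com/robertatakenaka/pat | pat/scripts/ops_old.py | classify_items
-- ===== SOURCE A (Python) =====
-- def classify_items(items):
--     groups = {}
--
--     for item in items:
--         asset_type = item["type"]
--         item_dt = item["dt"]
--         groups.setdefault(asset_type, {})
--         groups[asset_type].setdefault(item_dt, [])
--         groups[asset_type][item_dt].append(item)
--
--     return groups
-- ===== SOURCE B (Python) =====
-- def _distinct_ordered(values):
--     return list(dict.fromkeys(values))
--
--
-- def _group_by_dt(sub):
--     dts = _distinct_ordered(it["dt"] for it in sub)
--     return {dt: [it for it in sub if it["dt"] == dt] for dt in dts}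
--
--
-- def classify_items(items):
--     types = _distinct_ordered(it["type"] for it in items)
--     return {t: _group_by_dt([it for it in items if it["type"] == t])
--             for t in types}
-- ===== Notes on version B (the rewrite author's own statement) =====
-- stated objective: alternative
-- what changed: A builds the nested dict in one pass with mutable setdefault/append; B instead computes the first-occurrence key orders with dict.fromkeys and assembles the result by comprehensions that filter the items per type and per date.
import Mathlib
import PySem

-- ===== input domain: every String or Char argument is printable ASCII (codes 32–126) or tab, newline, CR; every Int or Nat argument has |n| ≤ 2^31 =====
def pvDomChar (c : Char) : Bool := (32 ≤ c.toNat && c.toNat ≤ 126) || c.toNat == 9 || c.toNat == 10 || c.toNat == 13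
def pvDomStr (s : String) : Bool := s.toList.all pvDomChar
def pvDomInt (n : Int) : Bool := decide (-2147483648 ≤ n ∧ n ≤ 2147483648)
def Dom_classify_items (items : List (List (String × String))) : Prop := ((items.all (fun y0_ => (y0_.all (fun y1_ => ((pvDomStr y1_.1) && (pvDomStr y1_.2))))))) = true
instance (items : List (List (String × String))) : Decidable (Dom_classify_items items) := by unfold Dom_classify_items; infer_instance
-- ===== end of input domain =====

-- B replaces A's one-pass mutable setdefault/append loop by first-occurrence key lists
-- (dict.fromkeys) plus per-key filter comprehensions; alternative decomposition, not faster.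

-- ===== PORT A =====
-- item["k"]: first-match lookup on the item's pairs; exact on Pre_ (key present, item keys unique)
def pvItemGet (item : List (String × String)) (k : String) : String :=
  (PySem.Dict.mk item).getD k ""

-- one iteration of A's loop (setdefault / setdefault / append, as functional updates)
def pvStepA (groups : PySem.Dict String (PySem.Dict String (List (List (String × String)))))
    (item : List (String × String)) :
    PySem.Dict String (PySem.Dict String (List (List (String × String)))) :=
  let asset_type := pvItemGet item "type"
  let item_dt := pvItemGet item "dt"
  let g1 := groups.setdefault asset_type PySem.Dict.empty
  let inner := g1.getD asset_type PySem.Dict.empty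
  let inner1 := inner.setdefault item_dt []
  let lst := inner1.getD item_dt []
  g1.insert asset_type (inner1.insert item_dt (lst ++ [item]))

def classify_items (items : List (List (String × String))) :
    List (String × List (String × List (List (String × String)))) :=
  ((items.foldl pvStepA PySem.Dict.empty).items).map (fun p => (p.1, p.2.items))

-- ===== PORT B =====
def pvGroupByDt (sub : List (List (String × String))) :
    List (String × List (List (String × String))) :=
  (PySem.List.dedup (sub.map (fun it => pvItemGet it "dt"))).map
    (fun dt => (dt, sub.filter (fun it => pvItemGet it "dt" == dt)))

def classify_items_alt (items : List (List (String × String))) :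
    List (String × List (String × List (List (String × String)))) :=
  (PySem.List.dedup (items.map (fun it => pvItemGet it "type"))).map
    (fun t => (t, pvGroupByDt (items.filter (fun it => pvItemGet it "type" == t))))

-- ===== PRECONDITION & SPEC =====
-- Pre_ excludes items missing a "type" or "dt" key, on which A raises KeyError, and items with
-- duplicate keys, where the Python-dict/assoc-list correspondence is ambiguous (a dict built
-- from the pairs keeps the last duplicate value, first-match association-list lookup the first).
def Pre_classify_items (items : List (List (String × String))) : Prop :=
  ∀ it ∈ items, (it.map Prod.fst).Nodup ∧ "type" ∈ it.map Prod.fst ∧ "dt" ∈ it.map Prod.fst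
instance (items : List (List (String × String))) : Decidable (Pre_classify_items items) := by
  unfold Pre_classify_items; infer_instance

def pvWitness_classify_items : (List (List (String × String))) :=
  [[("type", "a"), ("dt", "x")], [("type", "b"), ("dt", "x")]]

def Spec_classify_items (items : List (List (String × String))) (out : List (String × List (String × List (List (String × String))))) : Prop := out = classify_items_alt items
instance (items : List (List (String × String))) (out : List (String × List (String × List (List (String × String))))) : Decidable (Spec_classify_items items out) := by
  unfold Spec_classify_items
  haveI h1 : DecidableEq (List (String × List (List (String × String)))) := inferInstance
  haveI h2 : DecidableEq (String × List (String × List (List (String × String)))) := inferInstance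
  infer_instance

-- ===== CLAIM (what is proved, stated in full; the proofs are below) =====
def Claim_equal_classify_items : Prop := ∀ (items : List (List (String × String))), Dom_classify_items items → Pre_classify_items items → Spec_classify_items items (classify_items items)

-- ===== LEMMAS AND PROOFS =====

-- the net effect of one iteration of A's loop on the inner (per-type) dict
def pvInnerStep (inner : PySem.Dict String (List (List (String × String))))
    (it : List (String × String)) : PySem.Dict String (List (List (String × String))) :=
  inner.modify (pvItemGet it "dt") [] (· ++ [it])

lemma setdefault_insert_self {κ ν : Type} [BEq κ] [LawfulBEq κ]
    (d : PySem.Dict κ ν) (k : κ) (v w : ν) :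
    (d.setdefault k v).insert k w = d.insert k w := by
  by_cases h : d.contains k
  · rw [PySem.Dict.setdefault_of_contains d _ h]
  · rw [PySem.Dict.setdefault_of_not_contains d _ (by simpa using h),
      PySem.Dict.insert_insert_self]

-- A's loop body is a nested Dict.modify
lemma stepA_eq_modify (g : PySem.Dict String (PySem.Dict String (List (List (String × String)))))
    (it : List (String × String)) :
    pvStepA g it = g.modify (pvItemGet it "type") PySem.Dict.empty
      (fun inner => pvInnerStep inner it) := by
  unfold pvStepA pvInnerStep
  simp only [PySem.Dict.modify, PySem.Dict.getD_setdefault_self, setdefault_insert_self]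

lemma foldl_stepA_eq (l : List (List (String × String)))
    (g : PySem.Dict String (PySem.Dict String (List (List (String × String))))) :
    l.foldl pvStepA g =
      l.foldl (fun g it => g.modify (pvItemGet it "type") PySem.Dict.empty
        (fun inner => pvInnerStep inner it)) g := by
  induction l generalizing g with
  | nil => rfl
  | cons x l ih => simp only [List.foldl_cons, stepA_eq_modify, ih]

-- the entry of A's dict at t is the inner loop run over exactly the items of type t
lemma getD_foldl_stepA (l : List (List (String × String)))
    (g : PySem.Dict String (PySem.Dict String (List (List (String × String))))) (t : String) :
    (l.foldl pvStepA g).getD t PySem.Dict.empty =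
      (l.filter (fun it => pvItemGet it "type" == t)).foldl pvInnerStep
        (g.getD t PySem.Dict.empty) := by
  induction l generalizing g with
  | nil => rfl
  | cons x l ih =>
    simp only [List.foldl_cons, List.filter_cons, stepA_eq_modify, ih]
    by_cases hx : pvItemGet x "type" = t
    · simp [hx]
    · simp only [beq_iff_eq, hx, ite_false]
      rw [PySem.Dict.getD_modify]
      simp [Ne.symm hx]

lemma innerFold_getD (ys : List (List (String × String))) (dt : String) :
    ((ys.foldl pvInnerStep PySem.Dict.empty).getD dt []) =
      ys.filter (fun it => pvItemGet it "dt" == dt) := by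
  have h : ys.foldl pvInnerStep (PySem.Dict.empty) =
      (ys.map (fun it => (pvItemGet it "dt", it))).foldl
        (fun d p => d.modify p.1 [] (fun x => x ++ [p.2])) PySem.Dict.empty := by
    rw [List.foldl_map]
    rfl
  rw [h, PySem.Dict.getD_foldl_modify_append]
  simp [List.filter_map, Function.comp_def]

lemma keys_foldl_stepA (l : List (List (String × String))) :
    ((l.foldl pvStepA PySem.Dict.empty).keys) =
      PySem.Set.ofList (l.map (fun it => pvItemGet it "type")) := by
  rw [foldl_stepA_eq]
  rw [PySem.Dict.keys_foldl_modify_key l (fun it => pvItemGet it "type") PySem.Dict.empty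
    (fun _ it => fun inner => pvInnerStep inner it)]
  simp [PySem.Set.update_nil_left, PySem.Dict.keys_empty]

lemma nodup_keys_foldl_stepA (l : List (List (String × String))) :
    ((l.foldl pvStepA PySem.Dict.empty).keys).Nodup := by
  rw [foldl_stepA_eq]
  exact PySem.Dict.nodup_keys_foldl_modify_key l _ _ _ _ (by simp [PySem.Dict.keys_empty])

lemma keys_innerFold (ys : List (List (String × String))) :
    ((ys.foldl pvInnerStep PySem.Dict.empty).keys) =
      PySem.Set.ofList (ys.map (fun it => pvItemGet it "dt")) := by
  have h := PySem.Dict.keys_foldl_modify_key ys (fun it => pvItemGet it "dt") []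
    (fun _ it => fun x => x ++ [it]) PySem.Dict.empty
  rw [PySem.Dict.keys_empty, PySem.Set.update_nil_left] at h
  exact h

lemma nodup_keys_innerFold (ys : List (List (String × String))) :
    ((ys.foldl pvInnerStep PySem.Dict.empty).keys).Nodup := by
  exact PySem.Dict.nodup_keys_foldl_modify_key ys (fun it => pvItemGet it "dt") []
    (fun _ it => fun x => x ++ [it]) _ (by simp [PySem.Dict.keys_empty])

-- the inner dict's items list IS B's per-type group
lemma innerFold_items (ys : List (List (String × String))) :
    (ys.foldl pvInnerStep PySem.Dict.empty).items = pvGroupByDt ys := by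
  rw [PySem.Dict.items_eq_map_keys _ (nodup_keys_innerFold ys) []]
  rw [keys_innerFold]
  unfold pvGroupByDt
  rw [PySem.List.dedup_eq_ofList]
  exact List.map_congr_left (fun dt _ => by rw [innerFold_getD])

-- ===== VERDICT (by name: the statement is the Claim_ definition above) =====
theorem classify_items_spec : Claim_equal_classify_items := by
  intro items _ _
  unfold Spec_classify_items classify_items classify_items_alt
  rw [PySem.Dict.items_eq_map_keys _ (nodup_keys_foldl_stepA items) PySem.Dict.empty]
  rw [keys_foldl_stepA, List.map_map, PySem.List.dedup_eq_ofList]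
  refine List.map_congr_left (fun t _ => ?_)
  simp only [Function.comp_apply]
  rw [getD_foldl_stepA, PySem.Dict.getD_empty, innerFold_items]
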